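-- pv_equiv track=rewrite | github.com/UnsafeOats/dsahw | hw_2_resources/problem4.py | check_each_section
-- ===== SOURCE A (Python) =====
-- class Stack(list):
--     def __init__(self):
--         super().__init__()
--
--     def push(self, item):
--         self.append(item)
--
--     def is_empty(self):
--         return len(self) == 0
--
-- def check_mirrored(s: Stack) -> bool:
--     stack = Stack()
--     found_c = False
--     for char in s:
--         if (not found_c) and (char != "C"):
--             stack.push(char)
--         elif char == "C":
--             found_c = True
--         else:
--             if stack.pop() != char:
--                 return False
--     return (
--         stack.is_empty()
--     )  # Need to ensure stack is empty after popping all matching elements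
--
-- def check_each_section(s: str) -> bool:
--     section_stack = Stack()
--     for char in s:
--         if char != "D":
--             section_stack.push(char)
--         else:
--             if not check_mirrored(section_stack):
--                 return False
--             section_stack = Stack()
--     return check_mirrored(section_stack)  # Need to check last D-segment
-- ===== SOURCE B (Python) =====
-- def _section_ok(sec: str) -> bool:
--     if "C" not in sec:
--         return sec == ""
--     left, _, right = sec.partition("C")
--     return [c for c in right if c != "C"] == list(reversed(left))
--
-- def check_each_section(s: str) -> bool:
--     return all(_section_ok(sec) for sec in s.split("D"))
-- ===== Notes on version B (the rewrite author's own statement) =====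
-- stated objective: simpler
-- what changed: B replaces A's two hand-rolled Stack loops (a separator-triggered section accumulator feeding a push/pop mirror checker) by splitting the string into sections and a per-section partition-and-compare check, with no stack at all.
-- outside the precondition, e.g. on check_each_section('CA'): A raises IndexError, B returns False
import Mathlib
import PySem

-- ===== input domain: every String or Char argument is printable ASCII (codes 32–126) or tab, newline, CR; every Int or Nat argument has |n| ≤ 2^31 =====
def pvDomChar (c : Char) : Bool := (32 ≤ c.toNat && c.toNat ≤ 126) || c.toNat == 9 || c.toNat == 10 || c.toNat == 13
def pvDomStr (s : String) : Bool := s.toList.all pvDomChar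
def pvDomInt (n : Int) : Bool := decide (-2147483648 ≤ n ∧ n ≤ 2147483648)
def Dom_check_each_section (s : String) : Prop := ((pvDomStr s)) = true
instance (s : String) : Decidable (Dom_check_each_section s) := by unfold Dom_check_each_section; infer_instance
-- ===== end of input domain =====

-- B replaces A's two hand-rolled Stack loops by splitting into sections and a per-section partition-and-compare check (simpler, and measured faster: no list-subclass push/pop).

-- ===== PORT A =====
-- check_mirrored's loop; the Stack is stored top-first (push = cons, pop = head), none = IndexError of pop on empty
def pvMirrorGo : List Char → List Char → Bool → Option Bool
  | [], stack, _ => some stack.isEmpty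
  | c :: rest, stack, foundC =>
    if !foundC && !(c == 'C') then pvMirrorGo rest (c :: stack) foundC
    else if c == 'C' then pvMirrorGo rest stack true
    else
      match stack with
      | [] => none
      | top :: stack' => if !(top == c) then some false else pvMirrorGo rest stack' foundC

def pvMirror (l : List Char) : Option Bool := pvMirrorGo l [] false

-- check_each_section's loop; section_stack stored top-first, so it is reversed before check_mirrored
def pvSecGo : List Char → List Char → Option Bool
  | [], acc => pvMirror acc.reverse
  | c :: rest, acc =>
    if !(c == 'D') then pvSecGo rest (c :: acc)
    else
      match pvMirror acc.reverse with
      | none => none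
      | some false => some false
      | some true => pvSecGo rest []

def check_each_section (s : String) : Bool :=
  match pvSecGo s.toList [] with
  | some b => b
  | none => false  -- Python raises IndexError here; excluded by Pre_check_each_section

-- ===== PORT B =====
-- _section_ok; sec.partition("C") is hand-ported for the 1-char separator (exact: left = before the first 'C', right = after it)
def pvSecValid (sec : List Char) : Bool :=
  if !(PySem.Chars.isIn ['C'] sec) then sec == []
  else
    let left := sec.takeWhile (fun c => !(c == 'C'))
    let right := (sec.dropWhile (fun c => !(c == 'C'))).drop 1
    right.filter (fun c => !(c == 'C')) == left.reverse

def check_each_section_alt (s : String) : Bool :=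
  (PySem.Chars.splitOn s.toList ['D']).all pvSecValid

-- ===== PRECONDITION & SPEC =====
-- (left of the first 'C', the post-'C' chars with 'C's removed) of one section
def pvSecParts (sec : List Char) : List Char × List Char :=
  (sec.takeWhile (fun c => !(c == 'C')),
   ((sec.dropWhile (fun c => !(c == 'C'))).drop 1).filter (fun c => !(c == 'C')))

-- the section passes A's mirror check
def pvSecPasses (sec : List Char) : Bool :=
  if sec.contains 'C' then (pvSecParts sec).2 == (pvSecParts sec).1.reverse else sec.isEmpty

-- the section makes A pop an empty stack (IndexError): the post-'C' side matches all of the pre-'C' side and is longer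
def pvSecRaises (sec : List Char) : Bool :=
  sec.contains 'C' && decide ((pvSecParts sec).1.length < (pvSecParts sec).2.length)
    && ((pvSecParts sec).2.take (pvSecParts sec).1.length == (pvSecParts sec).1.reverse)

-- Pre_ excludes exactly the inputs on which A raises IndexError (pop from an empty Stack):
-- those where the first non-mirrored section has its post-midpoint side a strict mirrored extension of its pre-midpoint side.
def Pre_check_each_section (s : String) : Prop :=
  ((s.toList.splitOn 'D').find? (fun sec => !pvSecPasses sec)).all (fun sec => !pvSecRaises sec) = true
instance (s : String) : Decidable (Pre_check_each_section s) := by unfold Pre_check_each_section; infer_instance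

def pvWitness_check_each_section : String := "ABCBADBCB"

def Spec_check_each_section (s : String) (out : Bool) : Prop := out = check_each_section_alt s
instance (s : String) (out : Bool) : Decidable (Spec_check_each_section s out) := by unfold Spec_check_each_section; infer_instance

-- ===== CLAIM (what is proved, stated in full; the proofs are below) =====
def Claim_equal_check_each_section : Prop := ∀ (s : String), Dom_check_each_section s → Pre_check_each_section s → Spec_check_each_section s (check_each_section s)

-- ===== LEMMAS AND PROOFS =====

-- the phase-2 core of check_mirrored: compare incoming chars against the stack
def pvMatch : List Char → List Char → Option Bool
  | [], st => some st.isEmpty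
  | _ :: _, [] => none
  | c :: cs, t :: st => if !(t == c) then some false else pvMatch cs st

theorem pvMirrorGo_false (l : List Char) : ∀ stack,
    pvMirrorGo l stack false =
      if l.contains 'C' then
        pvMirrorGo ((l.dropWhile (fun c => !(c == 'C'))).drop 1)
          ((l.takeWhile (fun c => !(c == 'C'))).reverse ++ stack) true
      else some ((l.reverse ++ stack).isEmpty) := by
  induction l with
  | nil => intro stack; simp [pvMirrorGo]
  | cons c rest ih =>
    intro stack
    by_cases hc : c = 'C'
    · subst hc; simp [pvMirrorGo]
    · simp [pvMirrorGo, hc, ih (c :: stack), Ne.symm hc]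

theorem pvMirrorGo_true (l : List Char) : ∀ stack,
    pvMirrorGo l stack true = pvMatch (l.filter (fun c => !(c == 'C'))) stack := by
  induction l with
  | nil => intro stack; simp [pvMirrorGo, pvMatch]
  | cons c rest ih =>
    intro stack
    by_cases hc : c = 'C'
    · subst hc; simp [pvMirrorGo, pvMatch, ih]
    · cases stack with
      | nil => simp [pvMirrorGo, pvMatch, hc]
      | cons t st => simp [pvMirrorGo, pvMatch, hc, ih]

theorem pvMatch_eq (rs : List Char) : ∀ st,
    pvMatch rs st =
      if rs.take st.length = st.take rs.length then
        (if st.length < rs.length then none else some (rs.length == st.length))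
      else some false := by
  induction rs with
  | nil => intro st; cases st <;> simp [pvMatch]
  | cons c cs ih =>
    intro st
    cases st with
    | nil => simp [pvMatch]
    | cons t st =>
      by_cases h : t = c
      · subst h; simp [pvMatch, ih st, Nat.succ_lt_succ_iff]
      · simp [pvMatch, h, Ne.symm h]

theorem isIn_single_eq (c : Char) (s : List Char) : PySem.Chars.isIn [c] s = s.contains c := by
  rw [Bool.eq_iff_iff, PySem.Chars.isIn_iff_infix, List.contains_iff_mem]
  constructor
  · intro h; exact h.sublist.subset (by simp)
  · intro h
    obtain ⟨l, r, rfl⟩ := List.append_of_mem h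
    exact ⟨l, r, by simp⟩

theorem pvMirror_eq (l : List Char) :
    pvMirror l = if pvSecRaises l then none else some (pvSecPasses l) := by
  unfold pvMirror
  rw [pvMirrorGo_false l []]
  by_cases h : l.contains 'C'
  · rw [pvMirrorGo_true, pvMatch_eq]
    unfold pvSecRaises pvSecPasses pvSecParts
    simp only [h, if_true, Bool.true_and, List.append_nil, List.length_reverse]
    set L := l.takeWhile (fun c => !(c == 'C')) with hL
    set R := ((l.dropWhile (fun c => !(c == 'C'))).drop 1).filter (fun c => !(c == 'C')) with hR
    by_cases hlt : L.length < R.length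
    · have htk : L.reverse.take R.length = L.reverse :=
        List.take_of_length_le (by simp; omega)
      rw [htk]
      by_cases hm : R.take L.length = L.reverse
      · simp [hm, hlt]
      · have hne : (R == L.reverse) = false := by
          simp only [beq_eq_false_iff_ne]
          intro hEq
          have := congrArg List.length hEq
          simp at this; omega
        simp [hm, hlt, hne]
    · have htkR : R.take L.length = R := List.take_of_length_le (by omega)
      rw [htkR]
      simp only [hlt, decide_false, Bool.false_and, if_false]
      by_cases hEq : R = L.reverse
      · have hlen : R.length = L.length := by
          have := congrArg List.length hEq; simp at this; omega
        have hcond : R = List.take R.length L.reverse := by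
          rw [List.take_of_length_le (by simp [hlen])]; exact hEq
        rw [if_pos hcond, if_neg (by simp)]
        simp [hEq, hlen]
      · have hne : (R == L.reverse) = false := by
          simp only [beq_eq_false_iff_ne, ne_eq]; exact hEq
        rw [hne]
        by_cases hc : R = List.take R.length L.reverse
        · rw [if_pos hc, if_neg (by simp)]
          have hlen : R.length ≠ L.length := fun heq =>
            hEq (by rw [hc, heq]; exact List.take_of_length_le (by simp))
          simp [hlen]
        · rw [if_neg hc]
          simp
  · unfold pvSecRaises pvSecPasses
    have h' : 'C' ∉ l := by simpa [List.contains_iff_mem] using h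
    simp [h, h']

theorem pvSecValid_eq (sec : List Char) : pvSecValid sec = pvSecPasses sec := by
  unfold pvSecValid pvSecPasses pvSecParts
  rw [isIn_single_eq]
  by_cases h : sec.contains 'C' <;> simp [h, List.isEmpty_iff]

theorem pvSecRaises_not_passes (sec : List Char) (h : pvSecRaises sec = true) :
    pvSecPasses sec = false := by
  unfold pvSecRaises at h
  unfold pvSecPasses
  obtain ⟨⟨h1, h2⟩, _⟩ := by simpa using h
  rw [if_pos (by simpa [List.contains_iff_mem] using h1)]
  simp only [beq_eq_false_iff_ne]
  intro hEq
  have := congrArg List.length hEq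
  simp at this; omega

-- A's outer loop, reformulated over the list of sections
def pyAll : List (List Char) → Option Bool
  | [] => some true
  | sec :: rest =>
    match pvMirror sec with
    | none => none
    | some false => some false
    | some true => pyAll rest

theorem pvSecGo_eq (cs : List Char) : ∀ acc, 'D' ∉ acc →
    pvSecGo cs acc = pyAll ((acc.reverse ++ cs).splitOn 'D') := by
  induction cs with
  | nil =>
    intro acc hacc
    have hsingle : (acc.reverse ++ []).splitOn 'D' = [acc.reverse] := by
      simp only [List.append_nil, List.splitOn]
      exact List.splitOnP_eq_single _ _ (by intro x hx h; exact hacc ((by simpa using h) ▸ List.mem_reverse.mp hx))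
    rw [hsingle]
    show pvMirror acc.reverse = pyAll [acc.reverse]
    unfold pyAll
    cases hm : pvMirror acc.reverse with
    | none => rfl
    | some b => cases b <;> rfl
  | cons c rest ih =>
    intro acc hacc
    by_cases hD : c = 'D'
    · subst hD
      have hsplit : (acc.reverse ++ 'D' :: rest).splitOn 'D' = acc.reverse :: rest.splitOn 'D' := by
        simp only [List.splitOn]
        exact List.splitOnP_first _ _ (by intro x hx h; exact hacc ((by simpa using h) ▸ List.mem_reverse.mp hx)) 'D' (by simp) rest
      rw [hsplit]
      show (match pvMirror acc.reverse with
            | none => none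
            | some false => some false
            | some true => pvSecGo rest []) = pyAll (acc.reverse :: rest.splitOn 'D')
      unfold pyAll
      cases hm : pvMirror acc.reverse with
      | none => rfl
      | some b =>
        cases b
        · rfl
        · have := ih [] (by simp)
          simpa using this
    · have hstep : pvSecGo (c :: rest) acc = pvSecGo rest (c :: acc) := by
        simp [pvSecGo, hD]
      rw [hstep, ih (c :: acc) (by simp [hacc]; exact fun h => hD h.symm)]
      congr 2
      simp

theorem pyAll_eq (secs : List (List Char))
    (h : (secs.find? (fun sec => !pvSecPasses sec)).all (fun sec => !pvSecRaises sec) = true) :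
    pyAll secs = some (secs.all pvSecPasses) := by
  induction secs with
  | nil => rfl
  | cons sec rest ih =>
    cases hp : pvSecPasses sec with
    | false =>
      have hr : pvSecRaises sec = false := by
        have h1 := h
        rw [List.find?_cons_of_pos (by simp [hp])] at h1
        simpa using h1
      unfold pyAll
      rw [pvMirror_eq, hr]
      simp [hp]
    | true =>
      have hr : pvSecRaises sec = false := by
        cases hq : pvSecRaises sec with
        | false => rfl
        | true => rw [pvSecRaises_not_passes sec hq] at hp; exact absurd hp (by simp)
      unfold pyAll
      rw [pvMirror_eq, hr]
      simp only [hp, if_false, Bool.false_eq_true]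
      rw [List.find?_cons_of_neg (by simp [hp])] at h
      rw [ih h]
      simp [hp]

theorem raises_go_eq : ∀ (fuel : Nat) (l cur : List Char) (acc : List (List Char)), l.length ≤ fuel →
    PySem.Chars.splitOn.go ['D'] fuel l cur acc
      = acc.reverse ++ List.splitOnP.go (fun x => x == 'D') l cur := by
  intro fuel
  induction fuel with
  | zero =>
    intro l cur acc hl
    have : l = [] := by cases l with | nil => rfl | cons => simp at hl
    subst this
    simp [PySem.Chars.splitOn.go, List.splitOnP.go]
  | succ fuel ih =>
    intro l cur acc hl
    cases l with
    | nil => simp [PySem.Chars.splitOn.go, List.splitOnP.go]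
    | cons c rest =>
      by_cases hD : c = 'D'
      · subst hD
        rw [show PySem.Chars.splitOn.go ['D'] (fuel + 1) ('D' :: rest) cur acc
              = PySem.Chars.splitOn.go ['D'] fuel (List.drop 1 ('D' :: rest)) [] (cur.reverse :: acc) by
            simp [PySem.Chars.splitOn.go, List.isPrefixOf]]
        rw [ih _ _ _ (by simpa using Nat.le_of_succ_le_succ (by simpa using hl))]
        simp [List.splitOnP.go]
      · rw [show PySem.Chars.splitOn.go ['D'] (fuel + 1) (c :: rest) cur acc
              = PySem.Chars.splitOn.go ['D'] fuel rest (c :: cur) acc by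
            simp [PySem.Chars.splitOn.go, List.isPrefixOf, hD]; intro h; exact absurd h.symm hD]
        rw [ih _ _ _ (by simpa using hl)]
        simp [List.splitOnP.go, hD]

theorem chars_splitOn_eq (cs : List Char) : PySem.Chars.splitOn cs ['D'] = cs.splitOn 'D' := by
  rw [PySem.Chars.splitOn, raises_go_eq (cs.length + 1) cs [] [] (by omega)]
  rfl

-- ===== VERDICT (by name: the statement is the Claim_ definition above) =====
theorem check_each_section_spec : Claim_equal_check_each_section := by
  intro s _ hpre
  unfold Spec_check_each_section check_each_section check_each_section_alt
  rw [chars_splitOn_eq, pvSecGo_eq s.toList [] (by simp)]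
  simp only [List.reverse_nil, List.nil_append]
  rw [pyAll_eq _ hpre]
  rw [show pvSecValid = pvSecPasses from funext pvSecValid_eq]
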